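-- pv_equiv track=rewrite | github.com/charlcater/aoc2020 | day_06/aoc2020_06.py | part1
-- ===== SOURCE A (Python) =====
-- import string
--
-- qs = string.ascii_lowercase
--
-- def part1(groups):
--
--     count = 0
--
--     for group in groups:
--         groupanswers = []
--         for answers in group:
--             groupanswers.append(answers)
--
--         for q in qs:
--             if q in groupanswers:
--                 count += 1
--
--     return count
-- ===== SOURCE B (Python) =====
-- import string
--
-- LETTER_LIST = list(string.ascii_lowercase)
--
-- def part1(groups):
--     total = 0
--     for group in groups:
--         prev = None
--         for s in sorted(group):
--             if s != prev and s in LETTER_LIST: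
--                 total += 1
--             prev = s
--     return total
-- ===== Notes on version B (the rewrite author's own statement) =====
-- stated objective: alternative
-- what changed: Replaces A's per-group list copy plus 26 nested list-membership scans over the alphabet with sort-then-scan: each group is sorted once and a single linear pass counts elements that differ from their predecessor and are single lowercase letters (first occurrences of distinct letter answers).
import Mathlib
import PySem

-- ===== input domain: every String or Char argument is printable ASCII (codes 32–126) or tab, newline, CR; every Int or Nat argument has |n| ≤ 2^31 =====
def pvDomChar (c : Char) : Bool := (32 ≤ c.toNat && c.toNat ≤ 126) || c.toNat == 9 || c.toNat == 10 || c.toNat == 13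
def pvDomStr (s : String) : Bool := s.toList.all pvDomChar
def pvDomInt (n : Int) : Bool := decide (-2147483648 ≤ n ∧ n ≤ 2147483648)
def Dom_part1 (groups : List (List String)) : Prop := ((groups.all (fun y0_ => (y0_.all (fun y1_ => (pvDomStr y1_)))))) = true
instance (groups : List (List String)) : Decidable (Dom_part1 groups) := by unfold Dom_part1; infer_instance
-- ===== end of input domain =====

-- B replaces A's per-group list copy + 26 nested alphabet membership scans by sort-then-scan:
-- sort the group once, then one linear pass counting elements that differ from their predecessor
-- and are lowercase letters; objective: alternative. Equality of return values is proved.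

-- string.ascii_lowercase, iterated as 26 one-character strings (shared stdlib constant)
def asciiLowercase : List String :=
  ["a","b","c","d","e","f","g","h","i","j","k","l","m",
   "n","o","p","q","r","s","t","u","v","w","x","y","z"]

-- ===== PORT A =====
def part1 (groups : List (List String)) : Int :=
  groups.foldl (fun count group =>
    let groupanswers := group.foldl (fun ga answers => ga ++ [answers]) ([] : List String)
    asciiLowercase.foldl (fun c q => if q ∈ groupanswers then c + 1 else c) count) 0

-- ===== PORT B =====
-- LETTER_LIST = list(string.ascii_lowercase)
def LETTER_LIST : List String := asciiLowercase

def part1_alt (groups : List (List String)) : Int :=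
  (groups.foldl (fun total group =>
    ((PySem.List.sorted group (fun x => x) false).foldl
      (fun (st : Int × Option String) s =>
        (if some s ≠ st.2 ∧ s ∈ LETTER_LIST then st.1 + 1 else st.1, some s))
      (total, none)).1) 0)

-- ===== PRECONDITION & SPEC =====
def Spec_part1 (groups : List (List String)) (out : Int) : Prop := out = part1_alt groups
instance (groups : List (List String)) (out : Int) : Decidable (Spec_part1 groups out) := by unfold Spec_part1; infer_instance

-- ===== CLAIM (what is proved, stated in full; the proofs are below) =====
def Claim_equal_part1 : Prop := ∀ (groups : List (List String)), Dom_part1 groups → Spec_part1 groups (part1 groups)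

-- ===== LEMMAS AND PROOFS =====

theorem nodup_asciiLowercase : asciiLowercase.Nodup := by decide

-- counting a disjoint disjunction splits
theorem countP_or_disjoint {α : Type} (L : List α) (Q R : α → Bool)
    (hd : ∀ q, Q q = true → R q = false) :
    L.countP (fun q => Q q || R q) = L.countP Q + L.countP R := by
  induction L with
  | nil => simp
  | cons a t ih =>
    by_cases hq : Q a = true
    · simp [hq, hd a hq, ih]
      omega
    · simp only [Bool.not_eq_true] at hq
      by_cases hr : R a = true <;> simp [hq, hr, ih] <;> omega

-- B's scan over a sorted tail: with prev a lower bound of the tail, it counts exactly the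
-- alphabet letters occurring in the tail and different from prev.
theorem scan_count (t : List String) (hp : t.Pairwise (· ≤ ·)) (prev : Option String)
    (hprev : ∀ p, prev = some p → ∀ x ∈ t, p ≤ x) (total : Int) :
    (t.foldl (fun (st : Int × Option String) s =>
        (if some s ≠ st.2 ∧ s ∈ LETTER_LIST then st.1 + 1 else st.1, some s))
      (total, prev)).1
      = total + (asciiLowercase.countP (fun q => decide (q ∈ t ∧ some q ≠ prev)) : Int) := by
  induction t generalizing prev total with
  | nil => simp
  | cons s r ih =>
    have hs : ∀ x ∈ r, s ≤ x := (List.pairwise_cons.mp hp).1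
    have hr : r.Pairwise (· ≤ ·) := (List.pairwise_cons.mp hp).2
    simp only [List.foldl_cons]
    rw [ih hr (some s) (fun p hpp x hx => by cases hpp; exact hs x hx)]
    have hsome : asciiLowercase.countP (fun q => decide (q ∈ r ∧ some q ≠ some s))
        = asciiLowercase.countP (fun q => decide (q ∈ r ∧ q ≠ s)) := by
      apply List.countP_congr; intro q _; simp
    have key : ∀ q, q ≠ s → q ∈ r → some q ≠ prev := by
      intro q hqs hqr hqp
      rcases prev with _ | p
      · simp at hqp
      · have hqp' : q = p := by simpa using hqp
        have hps : p ≤ s := hprev p rfl s (by simp)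
        have hsq : s ≤ q := hs q hqr
        exact hqs (le_antisymm (hqp' ▸ hps) hsq)
    have hsplit : asciiLowercase.countP (fun q => decide (q ∈ s :: r ∧ some q ≠ prev))
        = asciiLowercase.countP (fun q => decide (q ∈ r ∧ q ≠ s))
          + asciiLowercase.countP (fun q => q == s && decide (some s ≠ prev)) := by
      rw [← countP_or_disjoint asciiLowercase _ _ ?hdisj]
      · apply List.countP_congr
        intro q _
        by_cases hqs : q = s
        · subst hqs; by_cases hc : some q = prev <;> simp [hc]
        · by_cases hqr : q ∈ r
          · simp [hqr, hqs, key q hqs hqr]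
          · simp [hqr, hqs]
      case hdisj =>
        intro q hq
        have hq' : q ∈ r ∧ q ≠ s := by simpa using hq
        simp [hq'.2]
    have hlast : asciiLowercase.countP (fun q => q == s && decide (some s ≠ prev))
        = if some s ≠ prev ∧ s ∈ LETTER_LIST then 1 else 0 := by
      by_cases hc : some s = prev
      · simp [hc]
      · have hcnt : asciiLowercase.countP (fun q => q == s && decide (some s ≠ prev))
            = asciiLowercase.count s := by
          apply List.countP_congr; intro q _; simp [hc]
        by_cases hmem : s ∈ asciiLowercase
        · rw [hcnt, List.count_eq_one_of_mem nodup_asciiLowercase hmem]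
          simp [hc, LETTER_LIST, hmem]
        · rw [hcnt, List.count_eq_zero_of_not_mem hmem]
          simp [hc, LETTER_LIST, hmem]
    rw [hsplit, hlast, hsome]
    split_ifs with h <;> push_cast <;> ring

-- per-group values agree: A's alphabet scan and B's sorted scan both count the distinct
-- lowercase-letter answers of the group.
theorem group_step (group : List String) (count : Int) :
    asciiLowercase.foldl (fun c q => if q ∈ group then c + 1 else c) count
      = ((PySem.List.sorted group (fun x => x) false).foldl
          (fun (st : Int × Option String) s =>
            (if some s ≠ st.2 ∧ s ∈ LETTER_LIST then st.1 + 1 else st.1, some s))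
          (count, none)).1 := by
  rw [scan_count _ (PySem.List.sorted_pairwise group (fun x => x)) none (by simp) count,
      PySem.List.foldl_ite_add_one]
  congr 2
  apply List.countP_congr
  intro q _
  simp [PySem.List.mem_sorted]

-- ===== VERDICT (by name: the statement is the Claim_ definition above) =====
theorem part1_spec : Claim_equal_part1 := by
  intro groups _
  unfold Spec_part1 part1 part1_alt
  simp only [PySem.List.foldl_append_singleton_eq_self, List.nil_append]
  exact PySem.List.foldl_congr_mem groups _ _ 0 (fun count group _ => group_step group count)
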